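-- pv_equiv track=rewrite | github.com/DTennant/ideation-epiplexity | analysis/parse_track1.py | split_runs
-- ===== SOURCE A (Python) =====
-- def split_runs(points):
--     """Split a list of (step, val_loss) into individual runs at step 0 resets."""
--     if not points:
--         return []
--     runs = []
--     current = []
--     for pt in points:
--         if pt[0] == 0 and current:
--             runs.append(current)
--             current = []
--         current.append(pt)
--     if current:
--         runs.append(current)
--     return runs
-- ===== SOURCE B (Python) =====
-- def split_runs(points):
--     """Split a list of (step, val_loss) into individual runs at step 0 resets."""
--     runs = []
--     i = 0
--     n = len(points)
--     while i < n:
--         j = i + 1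
--         while j < n and points[j][0] != 0:
--             j += 1
--         runs.append(points[i:j])
--         i = j
--     return runs
-- ===== Notes on version B (the rewrite author's own statement) =====
-- stated objective: alternative
-- what changed: Replaces A's accumulate-and-flush loop (element-wise append with a flush on each step-0 boundary and a trailing flush) by an outer loop that scans ahead to the end of each run and emits it as one slice points[i:j].
import Mathlib
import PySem

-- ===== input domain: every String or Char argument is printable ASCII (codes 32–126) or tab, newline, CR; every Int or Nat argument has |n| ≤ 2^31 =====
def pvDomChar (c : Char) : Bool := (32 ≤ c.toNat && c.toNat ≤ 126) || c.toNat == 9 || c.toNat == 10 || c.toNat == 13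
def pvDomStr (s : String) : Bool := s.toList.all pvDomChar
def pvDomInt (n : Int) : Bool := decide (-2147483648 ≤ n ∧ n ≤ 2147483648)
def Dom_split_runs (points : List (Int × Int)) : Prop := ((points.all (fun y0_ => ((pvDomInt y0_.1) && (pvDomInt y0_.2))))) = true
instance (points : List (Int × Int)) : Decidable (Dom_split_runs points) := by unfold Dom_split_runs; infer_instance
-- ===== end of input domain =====

-- B rewrites A's accumulate-and-flush loop as an outer scan that emits each run
-- as one slice of the input; alternative decomposition, same O(n) cost.

-- ===== PORT A =====
-- for pt in points: flush `current` on a step-0 boundary, then append pt; final flush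
def loopA : List (Int × Int) → List (List (Int × Int)) → List (Int × Int) → List (List (Int × Int))
  | [], runs, current => if current = [] then runs else runs ++ [current]
  | pt :: rest, runs, current =>
      if pt.1 = 0 ∧ current ≠ [] then loopA rest (runs ++ [current]) [pt]
      else loopA rest runs (current ++ [pt])

def split_runs (points : List (Int × Int)) : List (List (Int × Int)) :=
  if points = [] then [] else loopA points [] []

-- ===== PORT B =====
-- B's inner `while j < n and points[j][0] != 0: j += 1` scan and slice points[i:j]
-- are ported as takeWhile/dropWhile on the current suffix; the outer while loop
-- over i is the recursion on that suffix.
def altGo : List (Int × Int) → List (List (Int × Int))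
  | [] => []
  | p :: rest =>
      (p :: rest.takeWhile (fun q => q.1 != 0)) :: altGo (rest.dropWhile (fun q => q.1 != 0))
termination_by l => l.length
decreasing_by
  simp only [List.length_cons]
  exact Nat.lt_succ_of_le (List.length_dropWhile_le _ _)

def split_runs_alt (points : List (Int × Int)) : List (List (Int × Int)) :=
  altGo points

-- ===== PRECONDITION & SPEC =====
def Spec_split_runs (points : List (Int × Int)) (out : List (List (Int × Int))) : Prop := out = split_runs_alt points
instance (points : List (Int × Int)) (out : List (List (Int × Int))) : Decidable (Spec_split_runs points out) := by unfold Spec_split_runs; infer_instance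

-- ===== CLAIM (what is proved, stated in full; the proofs are below) =====
def Claim_equal_split_runs : Prop := ∀ (points : List (Int × Int)), Dom_split_runs points → Spec_split_runs points (split_runs points)

-- ===== LEMMAS AND PROOFS =====
lemma loopA_glue : ∀ (rest : List (Int × Int)) (runs : List (List (Int × Int)))
    (cur : List (Int × Int)), cur ≠ [] →
    loopA rest runs cur =
      runs ++ ((cur ++ rest.takeWhile (fun q => q.1 != 0)) ::
        altGo (rest.dropWhile (fun q => q.1 != 0)))
  | [], runs, cur, h => by simp [loopA, h, altGo]
  | p :: r, runs, cur, h => by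
      by_cases h0 : p.1 = 0
      · rw [loopA, if_pos ⟨h0, h⟩, loopA_glue r _ [p] (by simp),
          List.takeWhile_cons, List.dropWhile_cons]
        simp [h0, altGo]
      · rw [loopA, if_neg (by tauto), loopA_glue r runs (cur ++ [p]) (by simp),
          List.takeWhile_cons, List.dropWhile_cons]
        simp [h0]

-- ===== VERDICT (by name: the statement is the Claim_ definition above) =====
theorem split_runs_spec : Claim_equal_split_runs := by
  intro points _
  unfold Spec_split_runs split_runs split_runs_alt
  cases points with
  | nil => simp [altGo]
  | cons p rest =>
      simp only [reduceCtorEq, if_false]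
      show loopA (p :: rest) [] [] = altGo (p :: rest)
      rw [loopA, if_neg (by simp), List.nil_append,
        loopA_glue rest [] [p] (by simp), altGo]
      simp
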